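-- pv_equiv track=rewrite | github.com/pypi-data/pypi-mirror-384 | packages/ts-legalcheck/ts_legalcheck-1.1.2-py3-none-any.whl/ts_legalcheck/osadl/transformer/__init__.py | _is_index_dict
-- ===== SOURCE A (Python) =====
-- def _is_index_dict(data: dict) -> bool:
--     """Check if a dictionary represents a list with numeric string keys."""
--     if not data:
--         return False
--
--     keys = list(data.keys())
--     # Check if all keys are numeric strings
--     try:
--         numeric_keys = [int(k) for k in keys]
--         # Check if keys form a sequence starting from 1
--         return sorted(numeric_keys) == list(range(1, len(keys) + 1))
--     except (ValueError, TypeError):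
--         return False
-- ===== SOURCE B (Python) =====
-- def _is_index_dict(data: dict) -> bool:
--     """Check if a dictionary represents a list with numeric string keys."""
--     if not data:
--         return False
--     seen = set()
--     lo = None
--     hi = None
--     for k in data:
--         try:
--             v = int(k)
--         except (ValueError, TypeError):
--             return False
--         if v in seen:
--             return False
--         seen.add(v)
--         if lo is None or v < lo:
--             lo = v
--         if hi is None or v > hi:
--             hi = v
--     return lo == 1 and hi == len(seen)
-- ===== Notes on version B (the rewrite author's own statement) =====
-- stated objective: alternative
-- what changed: Replaced the sort-and-compare-to-range(1,n+1) with a single pass over the keys that maintains a seen-set and running min/max, returning False early on a non-numeric or duplicate key and finally checking min==1 and max==len(seen) (pigeonhole makes this equivalent).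
import Mathlib
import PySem

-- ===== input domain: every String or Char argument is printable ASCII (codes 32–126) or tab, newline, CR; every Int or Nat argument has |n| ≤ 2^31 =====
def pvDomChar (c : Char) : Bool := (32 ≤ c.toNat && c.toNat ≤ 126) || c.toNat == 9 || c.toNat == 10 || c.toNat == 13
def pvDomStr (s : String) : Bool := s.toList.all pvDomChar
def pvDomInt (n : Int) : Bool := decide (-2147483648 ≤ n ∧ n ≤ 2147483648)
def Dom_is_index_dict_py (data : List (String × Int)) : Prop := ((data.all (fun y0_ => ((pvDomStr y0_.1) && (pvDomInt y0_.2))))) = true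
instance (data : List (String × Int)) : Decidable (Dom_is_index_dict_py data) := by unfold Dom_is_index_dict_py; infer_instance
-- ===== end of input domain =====

-- B replaces A's build-list / sort / compare-to-range(1,n+1) with a single pass over the keys
-- maintaining a seen-set and running min/max, with early False on a bad or duplicate key.

-- ===== PORT A =====
-- [int(k) for k in keys]  (none = a ValueError raised inside the comprehension)
def intKeys? : List String → Option (List Int)
  | [] => some []
  | k :: ks =>
    match PySem.Int.ofStr? k with
    | none => none
    | some n =>
      match intKeys? ks with
      | none => none
      | some ns => some (n :: ns)

def is_index_dict_py (data : List (String × Int)) : Bool :=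
  if data = [] then false
  else
    let keys := (PySem.Dict.ofList data).keys
    match intKeys? keys with
    | none => false
    | some numeric_keys =>
      decide (PySem.List.sorted numeric_keys (fun x => x) false
                = PySem.List.pyRange 1 ((keys.length : Int) + 1) 1)

-- ===== PORT B =====
-- the 'for k in data' loop: state = (seen, lo, hi); early 'return False' = the false branches
def altLoop : List String → PySem.Set Int → Option Int → Option Int → Bool
  | [], seen, lo, hi => (lo == some 1) && (hi == some (seen.length : Int))
  | k :: ks, seen, lo, hi =>
    match PySem.Int.ofStr? k with
    | none => false
    | some v =>
      if PySem.Set.contains seen v then false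
      else
        altLoop ks (PySem.Set.add seen v)
          (match lo with | none => some v | some l => if v < l then some v else some l)
          (match hi with | none => some v | some h => if v > h then some v else some h)

def is_index_dict_py_alt (data : List (String × Int)) : Bool :=
  if data = [] then false
  else altLoop (PySem.Dict.ofList data).keys PySem.Set.empty none none

-- ===== PRECONDITION & SPEC =====
def Spec_is_index_dict_py (data : List (String × Int)) (out : Bool) : Prop := out = is_index_dict_py_alt data
instance (data : List (String × Int)) (out : Bool) : Decidable (Spec_is_index_dict_py data out) := by unfold Spec_is_index_dict_py; infer_instance

-- ===== CLAIM (what is proved, stated in full; the proofs are below) =====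
def Claim_equal_is_index_dict_py : Prop := ∀ (data : List (String × Int)), Dom_is_index_dict_py data → Spec_is_index_dict_py data (is_index_dict_py data)

-- ===== LEMMAS AND PROOFS =====

-- B's loop restricted to the already-converted integers (same state, same branches)
def loopSpec : List Int → PySem.Set Int → Option Int → Option Int → Bool
  | [], seen, lo, hi => (lo == some 1) && (hi == some (seen.length : Int))
  | v :: vs, seen, lo, hi =>
    if PySem.Set.contains seen v then false
    else
      loopSpec vs (PySem.Set.add seen v)
        (match lo with | none => some v | some l => if v < l then some v else some l)
        (match hi with | none => some v | some h => if v > h then some v else some h)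

lemma altLoop_eq (ks : List String) (seen : PySem.Set Int) (lo hi : Option Int) :
    altLoop ks seen lo hi =
      match intKeys? ks with
      | none => false
      | some ns => loopSpec ns seen lo hi := by
  induction ks generalizing seen lo hi with
  | nil => rfl
  | cons k ks ih =>
    simp only [altLoop, intKeys?]
    cases PySem.Int.ofStr? k with
    | none => rfl
    | some v =>
      simp only
      rw [ih]
      cases intKeys? ks with
      | none => split <;> rfl
      | some ns => rfl

def foldMin (lo : Option Int) (vs : List Int) : Option Int :=
  vs.foldl (fun o v => some (match o with | none => v | some l => if v < l then v else l)) lo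

def foldMax (hi : Option Int) (vs : List Int) : Option Int :=
  vs.foldl (fun o v => some (match o with | none => v | some h => if v > h then v else h)) hi

lemma minPush (lo : Option Int) (v : Int) :
    (match lo with | none => some v | some l => if v < l then some v else some l)
      = some (match lo with | none => v | some l => if v < l then v else l) := by
  cases lo with
  | none => rfl
  | some l => by_cases h : v < l <;> simp [h]

lemma maxPush (hi : Option Int) (v : Int) :
    (match hi with | none => some v | some h => if v > h then some v else some h)
      = some (match hi with | none => v | some h => if v > h then v else h) := by
  cases hi with
  | none => rfl
  | some l => by_cases h : v > l <;> simp [h]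

lemma foldMin_cons (lo : Option Int) (v : Int) (vs : List Int) :
    foldMin lo (v :: vs)
      = foldMin (some (match lo with | none => v | some l => if v < l then v else l)) vs := by
  simp [foldMin]

lemma foldMax_cons (hi : Option Int) (v : Int) (vs : List Int) :
    foldMax hi (v :: vs)
      = foldMax (some (match hi with | none => v | some h => if v > h then v else h)) vs := by
  simp [foldMax]

lemma foldMin_spec (vs : List Int) : ∀ l : Int, ∃ m, foldMin (some l) vs = some m ∧
    (m = l ∨ m ∈ vs) ∧ m ≤ l ∧ ∀ w ∈ vs, m ≤ w := by
  induction vs with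
  | nil => intro l; exact ⟨l, rfl, Or.inl rfl, le_refl _, by simp⟩
  | cons w ws ih =>
    intro l
    obtain ⟨m, hm, hmem, hle, hlb⟩ := ih (if w < l then w else l)
    refine ⟨m, hm, ?_, ?_, ?_⟩
    · rcases hmem with h | h
      · subst h; split <;> simp_all
      · exact Or.inr (List.mem_cons_of_mem _ h)
    · split_ifs at hle with h <;> omega
    · intro x hx
      rcases List.mem_cons.mp hx with rfl | hx
      · split_ifs at hle with h <;> omega
      · exact hlb x hx

lemma foldMax_spec (vs : List Int) : ∀ l : Int, ∃ m, foldMax (some l) vs = some m ∧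
    (m = l ∨ m ∈ vs) ∧ l ≤ m ∧ ∀ w ∈ vs, w ≤ m := by
  induction vs with
  | nil => intro l; exact ⟨l, rfl, Or.inl rfl, le_refl _, by simp⟩
  | cons w ws ih =>
    intro l
    obtain ⟨m, hm, hmem, hle, hub⟩ := ih (if w > l then w else l)
    refine ⟨m, hm, ?_, ?_, ?_⟩
    · rcases hmem with h | h
      · subst h; split <;> simp_all
      · exact Or.inr (List.mem_cons_of_mem _ h)
    · split_ifs at hle with h <;> omega
    · intro x hx
      rcases List.mem_cons.mp hx with rfl | hx
      · split_ifs at hle with h <;> omega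
      · exact hub x hx

-- the loop's boolean, characterised as a proposition over the remaining values and the state
lemma loopSpec_iff (vs : List Int) : ∀ (seen : PySem.Set Int) (lo hi : Option Int),
    loopSpec vs seen lo hi = true ↔
      vs.Nodup ∧ (∀ v ∈ vs, v ∉ seen) ∧ foldMin lo vs = some 1 ∧
        foldMax hi vs = some ((seen.length + vs.length : Nat) : Int) := by
  induction vs with
  | nil =>
    intro seen lo hi
    simp [loopSpec, foldMin, foldMax]
  | cons v vs ih =>
    intro seen lo hi
    simp only [loopSpec]
    by_cases hc : PySem.Set.contains seen v
    · have hv : v ∈ seen := PySem.Set.contains_iff seen v |>.mp hc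
      simp only [hc, if_true]
      constructor
      · intro h; exact absurd h (by simp)
      · rintro ⟨_, hns, _⟩; exact absurd (hns v (List.mem_cons_self)) (by simp [hv])
    · have hv : v ∉ seen := fun h => hc ((PySem.Set.contains_iff seen v).mpr h)
      simp only [hc, if_neg, Bool.false_eq_true, not_false_iff]
      rw [ih]
      have hlen : (PySem.Set.add seen v).length = seen.length + 1 := by
        rw [PySem.Set.add_of_not_mem hv]; simp
      rw [hlen]
      have hcast : seen.length + 1 + vs.length = seen.length + (v :: vs).length := by
        simp [List.length_cons]; omega
      rw [minPush, maxPush, hcast, foldMin_cons, foldMax_cons]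
      constructor
      · rintro ⟨hnd, hns, hmin, hmax⟩
        refine ⟨?_, ?_, hmin, hmax⟩
        · exact List.nodup_cons.mpr
            ⟨fun hm => (hns v hm) ((PySem.Set.mem_add _ _ _).mpr (Or.inr rfl)), hnd⟩
        · intro w hw
          rcases List.mem_cons.mp hw with rfl | hw
          · exact hv
          · exact fun hs => hns w hw ((PySem.Set.mem_add _ _ _).mpr (Or.inl hs))
      · rintro ⟨hnd, hns, hmin, hmax⟩
        obtain ⟨hnv, hnd'⟩ := List.nodup_cons.mp hnd
        refine ⟨hnd', ?_, hmin, hmax⟩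
        intro w hw hws
        rcases (PySem.Set.mem_add _ _ _).mp hws with hs | rfl
        · exact hns w (List.mem_cons_of_mem _ hw) hs
        · exact hnv hw

lemma intKeys?_length (ks : List String) (ns : List Int) (h : intKeys? ks = some ns) :
    ns.length = ks.length := by
  induction ks generalizing ns with
  | nil => simp only [intKeys?, Option.some.injEq] at h; simp [← h]
  | cons k ks ih =>
    simp only [intKeys?] at h
    cases hk : PySem.Int.ofStr? k <;> rw [hk] at h
    · exact absurd h (by simp)
    · cases hks : intKeys? ks <;> rw [hks] at h
      · exact absurd h (by simp)
      · cases h; simp [ih _ hks]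

-- a dict built from a nonempty list has at least one key
lemma upd_size (data : List (String × Int)) : ∀ d : PySem.Dict String Int, d.size ≤ (d.update data).size := by
  induction data with
  | nil => intro d; simp [PySem.Dict.update]
  | cons p rest ih =>
    intro d
    have h1 : d.size ≤ (d.insert p.1 p.2).size := by
      rw [PySem.Dict.size_insert]; split <;> omega
    calc d.size ≤ (d.insert p.1 p.2).size := h1
      _ ≤ ((d.insert p.1 p.2).update rest).size := ih _
      _ = (d.update (p :: rest)).size := by simp [PySem.Dict.update]

lemma keys_ne (data : List (String × Int)) (h : data ≠ []) : (PySem.Dict.ofList data).keys ≠ [] := by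
  obtain ⟨p, rest, rfl⟩ := List.exists_cons_of_ne_nil h
  have h2 : 1 ≤ ((PySem.Dict.empty.insert p.1 p.2).update rest).size := by
    refine le_trans ?_ (upd_size rest _)
    simp [PySem.Dict.insert, PySem.Dict.empty, PySem.Dict.size]
  have h3 : (PySem.Dict.ofList (p :: rest)).keys.length = (PySem.Dict.ofList (p :: rest)).size := by
    simp [PySem.Dict.keys, PySem.Dict.size]
  have h4 : PySem.Dict.ofList (p :: rest) = (PySem.Dict.empty.insert p.1 p.2).update rest := by
    simp [PySem.Dict.ofList, PySem.Dict.update]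
  intro hk
  rw [hk] at h3
  rw [h4] at h3
  simp at h3
  omega

-- the heart: sorted(ns) == range(1, n+1)  ↔  distinct values with running min 1 and max n (pigeonhole)
lemma core_iff (ns : List Int) (hne : ns ≠ []) :
    (PySem.List.sorted ns (fun x => x) false
        = PySem.List.pyRange 1 ((ns.length : Int) + 1) 1)
      ↔ (ns.Nodup ∧ foldMin none ns = some 1 ∧ foldMax none ns = some (ns.length : Int)) := by
  have hpos : 0 < ns.length := List.length_pos_iff.mpr hne
  obtain ⟨v, vs, rfl⟩ := List.exists_cons_of_ne_nil hne
  have hminS := foldMin_spec vs v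
  have hmaxS := foldMax_spec vs v
  obtain ⟨m1, hm1, hm1mem, hm1le, hm1lb⟩ := hminS
  obtain ⟨m2, hm2, hm2mem, hm2le, hm2ub⟩ := hmaxS
  set ns := v :: vs with hns
  have hmin1 : foldMin none ns = some m1 := by simpa [foldMin, hns] using hm1
  have hmax2 : foldMax none ns = some m2 := by simpa [foldMax, hns] using hm2
  have hm1mem' : m1 ∈ ns := by
    rcases hm1mem with rfl | h
    · exact List.mem_cons_self
    · exact List.mem_cons_of_mem _ h
  have hm2mem' : m2 ∈ ns := by
    rcases hm2mem with rfl | h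
    · exact List.mem_cons_self
    · exact List.mem_cons_of_mem _ h
  have hm1lb' : ∀ w ∈ ns, m1 ≤ w := by
    intro w hw; rcases List.mem_cons.mp hw with rfl | hw
    · exact hm1le
    · exact hm1lb w hw
  have hm2ub' : ∀ w ∈ ns, w ≤ m2 := by
    intro w hw; rcases List.mem_cons.mp hw with rfl | hw
    · exact hm2le
    · exact hm2ub w hw
  have hndR : (PySem.List.pyRange 1 ((ns.length : Int) + 1) 1).Nodup := PySem.List.nodup_pyRange_one ..
  rw [hmin1, hmax2]
  constructor
  · intro h
    have hperm : ns.Perm (PySem.List.pyRange 1 ((ns.length : Int) + 1) 1) := by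
      have := PySem.List.sorted_perm ns (fun x => x) false
      rw [h] at this; exact this.symm
    have hnd : ns.Nodup := hperm.nodup_iff.mpr hndR
    refine ⟨hnd, ?_, ?_⟩
    · have h1mem : (1:Int) ∈ ns := hperm.mem_iff.mpr (by
        rw [PySem.List.mem_pyRange_one]; omega)
      have hub : m1 ≤ 1 := hm1lb' 1 h1mem
      have hlb : (1:Int) ≤ m1 := by
        have := hperm.mem_iff.mp hm1mem'
        rw [PySem.List.mem_pyRange_one] at this; omega
      rw [le_antisymm hub hlb]
    · have hnmem : ((ns.length : Int)) ∈ ns := hperm.mem_iff.mpr (by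
        rw [PySem.List.mem_pyRange_one]; omega)
      have hlb : (ns.length : Int) ≤ m2 := hm2ub' _ hnmem
      have hub : m2 ≤ (ns.length : Int) := by
        have := hperm.mem_iff.mp hm2mem'
        rw [PySem.List.mem_pyRange_one] at this; omega
      rw [le_antisymm hub hlb]
  · rintro ⟨hnd, hmin, hmax⟩
    have he1 : m1 = 1 := by injection hmin
    have he2 : m2 = (ns.length : Int) := by injection hmax
    subst he1 he2
    have hsub : ns.toFinset ⊆ Finset.Icc (1:Int) (ns.length : Int) := by
      intro x hx
      have hx' := List.mem_toFinset.mp hx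
      exact Finset.mem_Icc.mpr ⟨hm1lb' x hx', hm2ub' x hx'⟩
    have hcard : ns.toFinset.card = ns.length := List.toFinset_card_of_nodup hnd
    have hcardI : (Finset.Icc (1:Int) (ns.length : Int)).card = ns.length := by
      rw [Int.card_Icc]; omega
    have heq : ns.toFinset = Finset.Icc (1:Int) (ns.length : Int) :=
      Finset.eq_of_subset_of_card_le hsub (by omega)
    have hperm : (PySem.List.pyRange 1 ((ns.length : Int) + 1) 1).Perm ns := by
      rw [List.perm_ext_iff_of_nodup hndR hnd]
      intro a
      rw [PySem.List.mem_pyRange_one, ← List.mem_toFinset, heq, Finset.mem_Icc]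
      omega
    exact PySem.List.sorted_eq_of_perm_of_pairwise_lt _ _ _ hperm (PySem.List.pairwise_lt_pyRange_one ..)

-- ===== VERDICT (by name: the statement is the Claim_ definition above) =====
theorem is_index_dict_py_spec : Claim_equal_is_index_dict_py := by
  intro data _
  unfold Spec_is_index_dict_py is_index_dict_py is_index_dict_py_alt
  by_cases hd : data = []
  · simp [hd]
  · simp only [if_neg hd]
    rw [altLoop_eq]
    cases hik : intKeys? (PySem.Dict.ofList data).keys with
    | none => rfl
    | some ns =>
      simp only
      have hlen : ns.length = (PySem.Dict.ofList data).keys.length := intKeys?_length _ _ hik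
      have hne : ns ≠ [] := by
        intro h0
        apply keys_ne data hd
        rw [h0] at hlen
        exact (List.length_eq_zero_iff.mp hlen.symm)
      rw [← hlen, Bool.eq_iff_iff]
      rw [decide_eq_true_eq, core_iff ns hne, loopSpec_iff]
      simp [PySem.Set.empty]
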